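-- pv_equiv track=rewrite | github.com/tanelpoder/0xtools | xtop/core/unified_formatter.py | reorder_columns_samples_first
-- ===== SOURCE A (Python) =====
-- from typing import List, Dict, Any, Optional, Tuple
--
-- def reorder_columns_samples_first(columns: List[str]) -> List[str]:
--     """Reorder columns to put samples-related columns first
--
--     Args:
--         columns: List of column names
--
--     Returns:
--         Reordered list
--     """
--     # Define priority order
--     priority = {
--         'samples': 1,
--         'avg_threads': 2,
--         'avg_thr': 2,
--         'time_bar': 3,
--         'pct': 4,
--         'percent': 4,
--     }
--
--     def get_priority(col: str):
--         col_lower = col.lower()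
--         for key, pri in priority.items():
--             if key in col_lower:
--                 return pri
--         return 100  # Default priority for other columns
--
--     # Separate priority columns from others
--     priority_cols = []
--     other_cols = []
--
--     for col in columns:
--         if get_priority(col) < 100:
--             priority_cols.append(col)
--         else:
--             other_cols.append(col)
--
--     # Sort priority columns by their priority
--     priority_cols.sort(key=get_priority)
--
--     # Return priority columns first, then others
--     return priority_cols + other_cols
-- ===== SOURCE B (Python) =====
-- from typing import List
--
--
-- def reorder_columns_samples_first(columns: List[str]) -> List[str]:
--     """Reorder columns to put samples-related columns first (single-pass bucket pass, no sort)."""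
--     priority = {
--         'samples': 1,
--         'avg_threads': 2,
--         'avg_thr': 2,
--         'time_bar': 3,
--         'pct': 4,
--         'percent': 4,
--     }
--
--     def get_priority(col: str):
--         col_lower = col.lower()
--         for key, pri in priority.items():
--             if key in col_lower:
--                 return pri
--         return 100
--
--     # One pass: drop each column into the bucket for its priority.
--     b1, b2, b3, b4, rest = [], [], [], [], []
--     for col in columns:
--         p = get_priority(col)
--         if p == 1:
--             b1.append(col)
--         elif p == 2:
--             b2.append(col)
--         elif p == 3:
--             b3.append(col)
--         elif p == 4:
--             b4.append(col)
--         else: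
--             rest.append(col)
--     return b1 + b2 + b3 + b4 + rest
-- ===== Notes on version B (the rewrite author's own statement) =====
-- stated objective: alternative
-- what changed: Replaces A's partition-into-two-lists plus a comparison sort of the priority list with a single bucket pass: each column is appended to one of five buckets (priorities 1-4 and 'other') and the buckets are concatenated, so no sort is performed.
import Mathlib
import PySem

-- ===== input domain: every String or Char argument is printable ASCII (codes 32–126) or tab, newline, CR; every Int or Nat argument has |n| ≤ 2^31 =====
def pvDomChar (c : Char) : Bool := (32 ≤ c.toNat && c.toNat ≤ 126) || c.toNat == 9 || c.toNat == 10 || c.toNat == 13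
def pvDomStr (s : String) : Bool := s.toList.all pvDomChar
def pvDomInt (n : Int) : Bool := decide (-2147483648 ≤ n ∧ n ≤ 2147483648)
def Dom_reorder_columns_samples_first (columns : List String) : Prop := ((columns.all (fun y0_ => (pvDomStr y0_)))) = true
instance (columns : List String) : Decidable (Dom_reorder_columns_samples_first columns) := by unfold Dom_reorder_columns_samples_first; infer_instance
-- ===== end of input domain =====

-- B replaces A's partition-plus-sort with a single bucket pass (five buckets, no sort); same return value, alternative algorithm.

-- ===== PORT A =====
-- get_priority: first matching substring of the priority dict (iterated in insertion order), default 100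
def pvGetPriority (col : String) : Int :=
  let cl := PySem.Str.lower col
  if PySem.Str.isIn "samples" cl then 1
  else if PySem.Str.isIn "avg_threads" cl then 2
  else if PySem.Str.isIn "avg_thr" cl then 2
  else if PySem.Str.isIn "time_bar" cl then 3
  else if PySem.Str.isIn "pct" cl then 4
  else if PySem.Str.isIn "percent" cl then 4
  else 100

def reorder_columns_samples_first (columns : List String) : List String :=
  let pc := columns.foldl
    (fun (acc : List String × List String) col =>
      if pvGetPriority col < 100 then (acc.1 ++ [col], acc.2) else (acc.1, acc.2 ++ [col]))
    ([], [])
  PySem.List.sorted pc.1 pvGetPriority ++ pc.2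

-- ===== PORT B =====
def reorder_columns_samples_first_alt (columns : List String) : List String :=
  let s := columns.foldl
    (fun (acc : List String × List String × List String × List String × List String) col =>
      let p := pvGetPriority col
      if p == 1 then (acc.1 ++ [col], acc.2.1, acc.2.2.1, acc.2.2.2.1, acc.2.2.2.2)
      else if p == 2 then (acc.1, acc.2.1 ++ [col], acc.2.2.1, acc.2.2.2.1, acc.2.2.2.2)
      else if p == 3 then (acc.1, acc.2.1, acc.2.2.1 ++ [col], acc.2.2.2.1, acc.2.2.2.2)
      else if p == 4 then (acc.1, acc.2.1, acc.2.2.1, acc.2.2.2.1 ++ [col], acc.2.2.2.2)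
      else (acc.1, acc.2.1, acc.2.2.1, acc.2.2.2.1, acc.2.2.2.2 ++ [col]))
    ([], [], [], [], [])
  s.1 ++ s.2.1 ++ s.2.2.1 ++ s.2.2.2.1 ++ s.2.2.2.2

-- ===== PRECONDITION & SPEC =====
def Spec_reorder_columns_samples_first (columns : List String) (out : List String) : Prop := out = reorder_columns_samples_first_alt columns
instance (columns : List String) (out : List String) : Decidable (Spec_reorder_columns_samples_first columns out) := by unfold Spec_reorder_columns_samples_first; infer_instance

-- ===== CLAIM (what is proved, stated in full; the proofs are below) =====
def Claim_equal_reorder_columns_samples_first : Prop := ∀ (columns : List String), Dom_reorder_columns_samples_first columns → Spec_reorder_columns_samples_first columns (reorder_columns_samples_first columns)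

-- ===== LEMMAS AND PROOFS =====

theorem pvGetPriority_cases (c : String) :
    pvGetPriority c = 1 ∨ pvGetPriority c = 2 ∨ pvGetPriority c = 3 ∨ pvGetPriority c = 4 ∨ pvGetPriority c = 100 := by
  unfold pvGetPriority
  dsimp only
  split_ifs <;> simp

theorem pv_insertBy_append_left {α : Type} (before : α → α → Bool) (x : α) (b rest : List α)
    (h : ∀ y ∈ b, before x y = false) :
    PySem.List.insertBy before x (b ++ rest) = b ++ PySem.List.insertBy before x rest := by
  induction b with
  | nil => simp
  | cons y ys ih =>
    simp only [List.cons_append, PySem.List.insertBy, h y (by simp)]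
    simp only [Bool.false_eq_true, if_false]
    rw [ih (fun z hz => h z (by simp [hz]))]

theorem pv_insertBy_of_forall_before {α : Type} (before : α → α → Bool) (x : α) (ys : List α)
    (h : ∀ y ∈ ys, before x y = true) :
    PySem.List.insertBy before x ys = x :: ys := by
  cases ys with
  | nil => simp [PySem.List.insertBy]
  | cons y t => simp [PySem.List.insertBy, h y (by simp)]

-- stable sort by a key with values in {1,2,3,4} is bucket concatenation
theorem pv_sorted_buckets {α : Type} (key : α → Int) (xs : List α)
    (h : ∀ x ∈ xs, key x = 1 ∨ key x = 2 ∨ key x = 3 ∨ key x = 4) :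
    PySem.List.sorted xs key =
      xs.filter (fun x => key x == 1) ++ xs.filter (fun x => key x == 2) ++
      xs.filter (fun x => key x == 3) ++ xs.filter (fun x => key x == 4) := by
  rw [PySem.List.sorted_eq_foldl_insertBy]
  induction xs using List.reverseRecOn with
  | nil => simp
  | append_singleton ys x ih =>
    have hmem : ∀ (i : Int) (y : α), y ∈ ys.filter (fun z => key z == i) → key y = i := by
      intro i y hy
      simpa using List.of_mem_filter hy
    rw [List.foldl_append, List.foldl_cons, List.foldl_nil,
      ih (fun z hz => h z (by simp [hz]))]
    rcases h x (by simp) with hx | hx | hx | hx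
    · -- key x = 1 : x goes to the end of bucket 1
      rw [List.append_assoc, List.append_assoc,
        pv_insertBy_append_left _ _ (ys.filter (fun z => key z == 1)) _
          (by intro y hy; have := hmem 1 y hy; simp [hx, this]),
        pv_insertBy_of_forall_before _ _ _
          (by intro y hy
              simp only [List.mem_append] at hy
              rcases hy with hy | hy | hy
              · have := hmem 2 y hy; simp [hx, this]
              · have := hmem 3 y hy; simp [hx, this]
              · have := hmem 4 y hy; simp [hx, this])]
      simp [List.filter_append, hx]
    · -- key x = 2
      rw [List.append_assoc, List.append_assoc, ← List.append_assoc,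
        pv_insertBy_append_left _ _
          (ys.filter (fun z => key z == 1) ++ ys.filter (fun z => key z == 2)) _
          (by intro y hy
              simp only [List.mem_append] at hy
              rcases hy with hy | hy
              · have := hmem 1 y hy; simp [hx, this]
              · have := hmem 2 y hy; simp [hx, this]),
        pv_insertBy_of_forall_before _ _ _
          (by intro y hy
              simp only [List.mem_append] at hy
              rcases hy with hy | hy
              · have := hmem 3 y hy; simp [hx, this]
              · have := hmem 4 y hy; simp [hx, this])]
      simp [List.filter_append, hx]
    · -- key x = 3
      rw [pv_insertBy_append_left _ _
          (ys.filter (fun z => key z == 1) ++ ys.filter (fun z => key z == 2) ++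
            ys.filter (fun z => key z == 3)) _
          (by intro y hy
              simp only [List.mem_append] at hy
              rcases hy with (hy | hy) | hy
              · have := hmem 1 y hy; simp [hx, this]
              · have := hmem 2 y hy; simp [hx, this]
              · have := hmem 3 y hy; simp [hx, this]),
        pv_insertBy_of_forall_before _ _ _
          (by intro y hy; have := hmem 4 y hy; simp [hx, this])]
      simp [List.filter_append, hx]
    · -- key x = 4 : appended at the very end
      rw [PySem.List.insertBy_of_forall_not_before _ _ _
          (by intro y hy
              simp only [List.mem_append] at hy
              rcases hy with ((hy | hy) | hy) | hy
              · have := hmem 1 y hy; simp [hx, this]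
              · have := hmem 2 y hy; simp [hx, this]
              · have := hmem 3 y hy; simp [hx, this]
              · have := hmem 4 y hy; simp [hx, this])]
      simp [List.filter_append, hx]

-- A's partition loop builds the two filters
theorem pv_partA (xs : List String) (a b : List String) :
    xs.foldl
      (fun (acc : List String × List String) col =>
        if pvGetPriority col < 100 then (acc.1 ++ [col], acc.2) else (acc.1, acc.2 ++ [col]))
      (a, b)
    = (a ++ xs.filter (fun c => decide (pvGetPriority c < 100)),
       b ++ xs.filter (fun c => !decide (pvGetPriority c < 100))) := by
  induction xs generalizing a b with
  | nil => simp
  | cons c t ih =>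
    by_cases hc : pvGetPriority c < 100 <;>
      simp [hc, ih]

-- B's bucket loop builds the five filters
theorem pv_foldB (xs : List String) (a b c d e : List String) :
    xs.foldl
      (fun (acc : List String × List String × List String × List String × List String) col =>
        let p := pvGetPriority col
        if p == 1 then (acc.1 ++ [col], acc.2.1, acc.2.2.1, acc.2.2.2.1, acc.2.2.2.2)
        else if p == 2 then (acc.1, acc.2.1 ++ [col], acc.2.2.1, acc.2.2.2.1, acc.2.2.2.2)
        else if p == 3 then (acc.1, acc.2.1, acc.2.2.1 ++ [col], acc.2.2.2.1, acc.2.2.2.2)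
        else if p == 4 then (acc.1, acc.2.1, acc.2.2.1, acc.2.2.2.1 ++ [col], acc.2.2.2.2)
        else (acc.1, acc.2.1, acc.2.2.1, acc.2.2.2.1, acc.2.2.2.2 ++ [col]))
      (a, b, c, d, e)
    = (a ++ xs.filter (fun z => pvGetPriority z == 1),
       b ++ xs.filter (fun z => pvGetPriority z == 2),
       c ++ xs.filter (fun z => pvGetPriority z == 3),
       d ++ xs.filter (fun z => pvGetPriority z == 4),
       e ++ xs.filter (fun z => pvGetPriority z == 100)) := by
  induction xs generalizing a b c d e with
  | nil => simp
  | cons x t ih =>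
    rcases pvGetPriority_cases x with hx | hx | hx | hx | hx <;>
      (simp at ih; simp [hx, ih])

theorem reorder_columns_samples_first_spec : Claim_equal_reorder_columns_samples_first := by
  intro columns _
  unfold Spec_reorder_columns_samples_first
  unfold reorder_columns_samples_first reorder_columns_samples_first_alt
  rw [pv_partA, pv_foldB]
  simp only [List.nil_append]
  rw [pv_sorted_buckets pvGetPriority _
    (by
      intro x hx
      have h100 : decide (pvGetPriority x < 100) = true := by simpa using List.of_mem_filter hx
      rcases pvGetPriority_cases x with h | h | h | h | h <;> simp [h] at h100 ⊢)]
  have hfi : ∀ i : Int, i < 100 →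
      (columns.filter (fun c => decide (pvGetPriority c < 100))).filter (fun z => pvGetPriority z == i)
      = columns.filter (fun z => pvGetPriority z == i) := by
    intro i hi
    rw [List.filter_filter]
    refine List.filter_congr ?_
    intro x _
    by_cases hpi : pvGetPriority x = i
    · simp [hpi]; omega
    · simp [hpi]
  have h100 : columns.filter (fun c => !decide (pvGetPriority c < 100))
      = columns.filter (fun z => pvGetPriority z == 100) := by
    refine List.filter_congr ?_
    intro x _
    rcases pvGetPriority_cases x with h | h | h | h | h <;> simp [h]
  rw [hfi 1 (by omega), hfi 2 (by omega), hfi 3 (by omega), hfi 4 (by omega), h100]
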